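-- pv_equiv track=rewrite | github.com/DiogoVSilva/IntelligentDataPlatform | dimensions.py | convert
-- ===== SOURCE A (Python) =====
-- def convert(word):
--     '''
--     Takes a word and converts it to a string of C's and N's.
--     '''
--
--     word = str(word)
--     result = list(word)
--     for i in range(len(result)):
--         if ord(result[i]) >= 48 and ord(result[i]) <= 57:
--             result[i] = "N"
--         else:
--             result[i] = "C"
--     return "".join(result)
-- ===== SOURCE B (Python) =====
-- import re
--
-- def convert(word):
--     '''
--     Takes a word and converts it to a string of C's and N's.
--     '''
--     word = str(word)
--     word = re.sub(r'[^0-9]', 'C', word)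
--     return re.sub(r'[0-9]', 'N', word)
-- ===== Notes on version B (the rewrite author's own statement) =====
-- stated objective: idiomatic
-- what changed: Replaces the index loop that mutates a char list with two regex substitutions: first all non-digit characters, then the remaining digit characters.
import Mathlib
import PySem

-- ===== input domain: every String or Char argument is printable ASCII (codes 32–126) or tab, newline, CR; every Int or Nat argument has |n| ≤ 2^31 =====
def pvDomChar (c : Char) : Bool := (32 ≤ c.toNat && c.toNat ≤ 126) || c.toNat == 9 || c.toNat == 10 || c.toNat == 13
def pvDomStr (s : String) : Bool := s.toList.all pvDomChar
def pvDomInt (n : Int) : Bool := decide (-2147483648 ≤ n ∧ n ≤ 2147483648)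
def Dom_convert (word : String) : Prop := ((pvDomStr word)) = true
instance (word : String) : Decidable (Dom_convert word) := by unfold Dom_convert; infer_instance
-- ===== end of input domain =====

-- B replaces A's index loop over a mutable char list with two regex
-- substitution passes (non-digits first, then digits); idiomatic, same cost.


-- ===== PORT A =====
-- for i in range(len(result)): result[i] = "N" if 48 <= ord(result[i]) <= 57 else "C"
def convert (word : String) : String :=
  String.mk ((word.toList).map (fun c =>
    if 48 ≤ c.toNat ∧ c.toNat ≤ 57 then 'N' else 'C'))

-- ===== PORT B =====
-- re.sub(r'[^0-9]', 'C', word): every char NOT in '0'..'9' becomes 'C'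
def convertSubNonDigit (s : List Char) : List Char :=
  s.map (fun c => if '0' ≤ c ∧ c ≤ '9' then c else 'C')
-- re.sub(r'[0-9]', 'N', word): every char in '0'..'9' becomes 'N'
def convertSubDigit (s : List Char) : List Char :=
  s.map (fun c => if '0' ≤ c ∧ c ≤ '9' then 'N' else c)
def convert_alt (word : String) : String :=
  String.mk (convertSubDigit (convertSubNonDigit word.toList))

-- ===== PRECONDITION & SPEC =====
def Spec_convert (word : String) (out : String) : Prop := out = convert_alt word
instance (word : String) (out : String) : Decidable (Spec_convert word out) := by unfold Spec_convert; infer_instance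

-- ===== CLAIM (what is proved, stated in full; the proofs are below) =====
def Claim_equal_convert : Prop := ∀ (word : String), Dom_convert word → Spec_convert word (convert word)

-- ===== LEMMAS AND PROOFS =====
theorem convert_digit_iff (c : Char) :
    (('0':Char) ≤ c ∧ c ≤ '9') ↔ (48 ≤ c.toNat ∧ c.toNat ≤ 57) := Iff.rfl

-- the two regex passes act on one char exactly as A's single if/else does
theorem convert_char (c : Char) :
    (fun c => if ('0':Char) ≤ c ∧ c ≤ '9' then 'N' else c)
      ((fun c => if ('0':Char) ≤ c ∧ c ≤ '9' then c else 'C') c) =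
    (if 48 ≤ c.toNat ∧ c.toNat ≤ 57 then 'N' else 'C') := by
  by_cases h : ('0':Char) ≤ c ∧ c ≤ '9'
  · simp [h, (convert_digit_iff c).mp h]
  · have h' : ¬ (48 ≤ c.toNat ∧ c.toNat ≤ 57) := fun hd => h ((convert_digit_iff c).mpr hd)
    simp [h, h']

-- ===== VERDICT (by name: the statement is the Claim_ definition above) =====
theorem convert_spec : Claim_equal_convert := by
  intro word _
  unfold Spec_convert convert convert_alt convertSubDigit convertSubNonDigit
  simp only [List.map_map]
  congr 1
  apply List.map_congr_left
  intro c _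
  exact (convert_char c).symm
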